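-- pv_equiv track=rewrite | github.com/riccozzz/Weather-Tools | wxtools/metar.py | _pop_sky_condition
-- ===== SOURCE A (Python) =====
-- from dataclasses import dataclass
--
-- def _pop_sky_condition(observations: list[str]) -> str:
--     sky_condition = ""
--     for group in reversed(observations):
--         if len(group) < 3:
--             break
--         if group[0:3] not in SkyLayer.descriptions:
--             break
--         sky_condition = f"{observations.pop()} {sky_condition}"
--     return sky_condition.strip()
--
-- @dataclass
-- class SkyLayer:
--     """Dataclass for a sky condition layer from a METAR."""
--
--     descriptions = {
--         "CLR": "Clear",
--         "SKC": "Clear",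
--         "FEW": "Few",
--         "SCT": "Scattered",
--         "BKN": "Broken",
--         "OVC": "Overcast",
--         "VV": "Vertical Visibility",
--     }
--
--     coverage: str
--     height: float | None
--     cb_flag: bool = False
--
--     @property
--     def coverage_description(self) -> str:
--         """A descriptive string for the corresponding METAR abbreviation."""
--         return self.descriptions[self.coverage]
-- ===== SOURCE B (Python) =====
-- # B: find the boundary index of the trailing sky-condition run first, then bulk-slice,
-- # delete and join -- instead of A's interleaved pop-and-concatenate loop.
-- # Mutates `observations` exactly like A (removes the same trailing groups).
-- _SKY_KEYS = frozenset(("CLR", "SKC", "FEW", "SCT", "BKN", "OVC", "VV"))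
--
--
-- def _pop_sky_condition(observations: list[str]) -> str:
--     idx = len(observations)
--     while idx > 0:
--         group = observations[idx - 1]
--         if len(group) < 3 or group[:3] not in _SKY_KEYS:
--             break
--         idx -= 1
--     tokens = observations[idx:]
--     del observations[idx:]
--     return " ".join(tokens).strip()
-- ===== Notes on version B (the rewrite author's own statement) =====
-- stated objective: alternative
-- what changed: A interleaves popping each matching trailing group with string concatenation ('popped + " " + acc') and strips at the end; B first scans backward with an index to find the boundary of the trailing sky-condition run without touching the list, then removes that suffix in one bulk 'del observations[idx:]' and builds the result with a single ' '.join of the slice.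
import Mathlib
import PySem

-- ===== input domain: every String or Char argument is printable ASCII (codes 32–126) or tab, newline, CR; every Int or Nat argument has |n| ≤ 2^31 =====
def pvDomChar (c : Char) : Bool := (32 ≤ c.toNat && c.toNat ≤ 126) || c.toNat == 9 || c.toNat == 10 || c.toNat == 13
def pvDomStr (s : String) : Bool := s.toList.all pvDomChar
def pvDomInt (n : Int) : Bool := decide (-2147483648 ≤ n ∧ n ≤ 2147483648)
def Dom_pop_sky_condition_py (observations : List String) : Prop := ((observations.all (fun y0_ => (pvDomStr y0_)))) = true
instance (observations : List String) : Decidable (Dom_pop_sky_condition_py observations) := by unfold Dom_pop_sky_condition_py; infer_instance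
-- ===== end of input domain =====

-- B finds the boundary of the trailing sky-condition run by a backward index scan, then
-- slices and joins once, instead of A's interleaved pop-and-concatenate loop (objective:
-- alternative decomposition, same cost). Both A and B mutate `observations` identically
-- in Python (the same trailing groups are removed); the equivalence proved here is about
-- the RETURN value.

-- ===== PORT A =====
-- SkyLayer.descriptions (the dict the Python tests membership in)
def skyDescriptions : PySem.Dict String String :=
  PySem.Dict.ofList [("CLR", "Clear"), ("SKC", "Clear"), ("FEW", "Few"), ("SCT", "Scattered"),
    ("BKN", "Broken"), ("OVC", "Overcast"), ("VV", "Vertical Visibility")]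

-- the `for group in reversed(observations)` loop: first argument is the reversed iterator's
-- remaining items, second the current (mutated-by-pop) list, third `sky_condition`
def popSkyLoopA : List String → List String → String → String
  | [], _, acc => acc
  | group :: rev, lst, acc =>
    if PySem.Str.len group < 3 then acc
    else if skyDescriptions.contains (PySem.Str.slice group (some 0) (some 3)) = false then acc
    else
      match lst.getLast? with
      | some popped => popSkyLoopA rev lst.dropLast (popped ++ " " ++ acc)
      | none => acc   -- never reached: `lst` is nonempty whenever the loop body runs

def pop_sky_condition_py (observations : List String) : String :=
  PySem.Str.strip (popSkyLoopA observations.reverse observations "")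

-- ===== PORT B =====
def skyKeys : PySem.Set String :=
  PySem.Set.ofList ["CLR", "SKC", "FEW", "SCT", "BKN", "OVC", "VV"]

-- the `while idx > 0` boundary scan of Source B: recursion on idx, list untouched
def popSkyScanB (observations : List String) : Nat → Nat
  | 0 => 0
  | n + 1 =>
    match PySem.List.pyGet? observations ((n : Int)) with
    | some group =>
      if PySem.Str.len group < 3 ∨ ¬ PySem.Str.slice group none (some 3) ∈ skyKeys then n + 1
      else popSkyScanB observations n
    | none => n + 1   -- never reached: idx - 1 is a valid index while idx > 0

def pop_sky_condition_py_alt (observations : List String) : String :=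
  let idx := popSkyScanB observations observations.length
  let tokens := PySem.List.slice observations (some (idx : Int)) none
  PySem.Str.strip (PySem.Str.join " " tokens)

-- ===== PRECONDITION & SPEC =====
def Spec_pop_sky_condition_py (observations : List String) (out : String) : Prop := out = pop_sky_condition_py_alt observations
instance (observations : List String) (out : String) : Decidable (Spec_pop_sky_condition_py observations out) := by unfold Spec_pop_sky_condition_py; infer_instance

-- ===== CLAIM (what is proved, stated in full; the proofs are below) =====
def Claim_equal_pop_sky_condition_py : Prop := ∀ (observations : List String), Dom_pop_sky_condition_py observations → Spec_pop_sky_condition_py observations (pop_sky_condition_py observations)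

-- ===== LEMMAS AND PROOFS =====

-- the group test both versions apply, as one Boolean
def okSky (g : String) : Bool :=
  decide (3 ≤ PySem.Str.len g) && skyDescriptions.contains (PySem.Str.slice g (some 0) (some 3))

theorem strToList_inj (s t : String) (h : s.toList = t.toList) : s = t :=
  String.ext (by simpa [String.toList] using h)

-- dict-key membership (A) coincides with frozenset membership (B)
theorem contains_descr_eq (s : String) :
    skyDescriptions.contains s = decide (s ∈ skyKeys) := by
  have h1 : skyDescriptions = PySem.Dict.mk [("CLR", "Clear"), ("SKC", "Clear"), ("FEW", "Few"),
      ("SCT", "Scattered"), ("BKN", "Broken"), ("OVC", "Overcast"), ("VV", "Vertical Visibility")] := by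
    decide
  have h2 : skyKeys = ["CLR", "SKC", "FEW", "SCT", "BKN", "OVC", "VV"] := by decide
  simp only [h1, h2, PySem.Dict.contains_mk]
  rw [Bool.eq_iff_iff]
  simp only [List.any_cons, List.any_nil, Bool.or_eq_true, beq_iff_eq, decide_eq_true_eq,
    List.mem_cons, List.not_mem_nil, or_false, Bool.false_eq_true]
  tauto

-- g[0:3] = g[:3]
theorem slice03_eq (g : String) :
    PySem.Str.slice g (some 0) (some 3) = PySem.Str.slice g none (some 3) := by
  apply strToList_inj
  simp [PySem.Str.toList_slice, PySem.Chars.slice_eq_listSlice]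

-- B's break condition is the negation of okSky
theorem condB_iff (g : String) :
    (PySem.Str.len g < 3 ∨ ¬ PySem.Str.slice g none (some 3) ∈ skyKeys) ↔ okSky g = false := by
  rw [← slice03_eq g]
  unfold okSky
  rw [contains_descr_eq]
  by_cases h3 : PySem.Str.len g < 3
  · have h3' : g.length < 3 := by simpa [PySem.Str.len_eq] using h3
    simp only [decide_eq_false (by omega : ¬ 3 ≤ PySem.Str.len g), Bool.false_and]
    simp [h3']
  · have h3' : 3 ≤ g.length := by
      have : 3 ≤ PySem.Str.len g := by omega
      simpa [PySem.Str.len_eq] using this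
    by_cases hm : PySem.Str.slice g (some 0) (some 3) ∈ skyKeys
    · simp only [decide_eq_true (by omega : 3 ≤ PySem.Str.len g), Bool.true_and]
      simp [h3', hm]
    · simp [h3', hm]

-- A's loop, run with `lst` equal to the reverse of the remaining reversed items,
-- is a fold over the matching prefix of the reversed list
theorem popSkyLoopA_eq (rev : List String) :
    ∀ acc, popSkyLoopA rev rev.reverse acc
      = (rev.takeWhile okSky).foldl (fun a g => g ++ " " ++ a) acc := by
  induction rev with
  | nil => intro acc; simp [popSkyLoopA]
  | cons g rest ih =>
    intro acc
    by_cases h3 : PySem.Str.len g < 3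
    · have : okSky g = false := by
        simp only [okSky, decide_eq_false (by omega : ¬ 3 ≤ PySem.Str.len g), Bool.false_and]
      simp only [popSkyLoopA]
      rw [if_pos h3]
      simp [this]
    · by_cases hc : skyDescriptions.contains (PySem.Str.slice g (some 0) (some 3)) = false
      · have : okSky g = false := by simp only [okSky, hc, Bool.and_false]
        simp [popSkyLoopA, hc, this]
      · have hok : okSky g = true := by
          simp only [okSky, Bool.and_eq_true, decide_eq_true_eq]
          exact ⟨by omega, by simpa using hc⟩
        have hl : (g :: rest).reverse = rest.reverse ++ [g] := by simp
        rw [hl]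
        simp only [popSkyLoopA, if_neg h3, if_neg hc, List.getLast?_concat,
          List.dropLast_concat]
        rw [ih]
        simp [hok]

-- the fold produces (each matched group ++ " "), back to front, before acc
theorem foldl_toList (ts : List String) :
    ∀ acc : String, ((ts.foldl (fun a g => g ++ " " ++ a) acc)).toList
      = ((ts.reverse.map (fun g => g.toList ++ [' '])).flatten) ++ acc.toList := by
  induction ts with
  | nil => intro acc; simp
  | cons g rest ih =>
    intro acc
    simp only [List.foldl_cons, List.reverse_cons, List.map_append, List.flatten_append]
    rw [ih]
    simp [String.toList_append]

-- flatten of (x ++ " ") blocks is the " "-join plus one trailing space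
theorem flatten_blocks (l : List (List Char)) :
    (l.map (fun x => x ++ [' '])).flatten
      = if l = [] then [] else PySem.Chars.join [' '] l ++ [' '] := by
  induction l with
  | nil => simp
  | cons x rest ih =>
    cases rest with
    | nil => simp [PySem.Chars.join_singleton]
    | cons y t =>
      simp only [List.map_cons, List.flatten_cons] at ih ⊢
      rw [ih]
      simp [PySem.Chars.join_cons_cons]

theorem rstrip_concat (y : List Char) :
    PySem.Chars.rstrip (y ++ [' ']) = PySem.Chars.rstrip y := by
  simp [PySem.Chars.rstrip, show PySem.Chars.isspace ' ' = true from rfl]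

theorem strip_concat (x : List Char) :
    PySem.Chars.strip (x ++ [' ']) = PySem.Chars.strip x := by
  simp only [PySem.Chars.strip, PySem.Chars.lstrip, List.dropWhile_append]
  by_cases h : (List.dropWhile PySem.Chars.isspace x).isEmpty = true
  · simp [show List.dropWhile PySem.Chars.isspace [' '] = [] from rfl,
      List.isEmpty_iff.mp h, PySem.Chars.rstrip]
  · simp only [h]
    exact rstrip_concat _

-- scanning an extended list never looks past the old part while idx stays in it
theorem popSkyScanB_append (xs : List String) (x : String) :
    ∀ n, n ≤ xs.length → popSkyScanB (xs ++ [x]) n = popSkyScanB xs n := by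
  intro n
  induction n with
  | zero => intro _; simp [popSkyScanB]
  | succ m ih =>
    intro hm
    have hidx : (xs ++ [x])[m]? = xs[m]? := List.getElem?_append_left (by omega)
    cases hg : xs[m]? with
    | none => simp only [popSkyScanB, PySem.List.pyGet?_natCast, hidx, hg]
    | some g =>
      simp only [popSkyScanB, PySem.List.pyGet?_natCast, hidx, hg]
      by_cases hb : PySem.Str.len g < 3 ∨ ¬ PySem.Str.slice g none (some 3) ∈ skyKeys
      · rw [if_pos hb, if_pos hb]
      · rw [if_neg hb, if_neg hb]
        exact ih (by omega)

-- the scan's result: length minus the length of the matching reversed prefix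
theorem popSkyScanB_spec (obs : List String) :
    popSkyScanB obs obs.length = obs.length - (obs.reverse.takeWhile okSky).length := by
  induction obs using List.reverseRecOn with
  | nil => simp [popSkyScanB]
  | append_singleton xs x ih =>
    have hlen : (xs ++ [x]).length = xs.length + 1 := by simp
    have hget : (xs ++ [x])[xs.length]? = some x := by
      simp
    rw [hlen]
    simp only [popSkyScanB, PySem.List.pyGet?_natCast, hget]
    by_cases hb : PySem.Str.len x < 3 ∨ ¬ PySem.Str.slice x none (some 3) ∈ skyKeys
    · have hok : okSky x = false := (condB_iff x).mp hb
      rw [if_pos hb]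
      have htw : ((xs ++ [x]).reverse).takeWhile okSky = [] := by
        simp [hok]
      rw [htw]
      simp
    · have hok : okSky x = true := by
        cases h : okSky x
        · exact absurd ((condB_iff x).mpr h) hb
        · rfl
      have ht : (xs.reverse.takeWhile okSky).length ≤ xs.length := by
        have := (List.takeWhile_prefix (p := okSky) (l := xs.reverse)).length_le
        simpa using this
      rw [if_neg hb, popSkyScanB_append xs x xs.length (le_refl _), ih]
      have htw : ((xs ++ [x]).reverse).takeWhile okSky = x :: xs.reverse.takeWhile okSky := by
        simp [hok]
      rw [htw]
      simp only [List.length_cons]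
      omega

-- ===== VERDICT (by name: the statement is the Claim_ definition above) =====
theorem pop_sky_condition_py_spec : Claim_equal_pop_sky_condition_py := by
  intro obs _
  unfold Spec_pop_sky_condition_py
  simp only [pop_sky_condition_py, pop_sky_condition_py_alt]
  set ts := obs.reverse.takeWhile okSky with hts
  have h1 : ts = obs.reverse.take ts.length := by
    simpa [hts] using (List.prefix_iff_eq_take.mp (List.takeWhile_prefix okSky))
  have htok : PySem.List.slice obs (some ((obs.length - ts.length : Nat) : Int)) none
      = ts.reverse := by
    rw [PySem.List.slice_from_natCast]
    have h2 := List.reverse_take (l := obs.reverse) (i := ts.length)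
    rw [← h1] at h2
    simpa using h2.symm
  have hA : popSkyLoopA obs.reverse obs "" = ts.foldl (fun a g => g ++ " " ++ a) "" := by
    have h := popSkyLoopA_eq obs.reverse (acc := "")
    rw [List.reverse_reverse] at h
    simpa [hts] using h
  rw [hA, popSkyScanB_spec obs, htok]
  apply strToList_inj
  rw [PySem.Str.toList_strip, PySem.Str.toList_strip, PySem.Str.toList_join]
  rw [foldl_toList]
  have hmap : ts.reverse.map (fun g => g.toList ++ [' '])
      = (ts.reverse.map String.toList).map (fun x => x ++ [' ']) := by
    simp [List.map_map, Function.comp]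
  rw [hmap, flatten_blocks]
  by_cases hnil : ts.reverse.map String.toList = []
  · simp [hnil, PySem.Chars.join_nil, show ("" : String).toList = [] from rfl]
  · simp only [hnil, if_false, show ("" : String).toList = [] from rfl, List.append_nil]
    rw [show (" " : String).toList = [' '] from rfl]
    exact strip_concat _
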